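-- pv_equiv track=rewrite | github.com/dusk-audio/dusk-audio-plugins | groovemind-training/train_models.py | note_to_category
-- ===== SOURCE A (Python) =====
-- GM_DRUM_MAP = {
--     35: 'kick', 36: 'kick',
--     37: 'sidestick', 38: 'snare', 39: 'clap', 40: 'snare',
--     41: 'tom_low', 42: 'hihat_closed', 43: 'tom_low', 44: 'hihat_pedal',
--     45: 'tom_mid', 46: 'hihat_open', 47: 'tom_mid', 48: 'tom_high',
--     49: 'crash', 50: 'tom_high', 51: 'ride', 52: 'china',
--     53: 'ride_bell', 54: 'tambourine', 55: 'splash', 56: 'cowbell',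
--     57: 'crash2', 58: 'vibraslap', 59: 'ride2'
-- }
--
-- def note_to_category(note: int) -> int:
--     """Map MIDI note to instrument category index."""
--     name = GM_DRUM_MAP.get(note, 'other')
--     if 'kick' in name:
--         return 0
--     elif 'snare' in name or 'sidestick' in name or 'clap' in name:
--         return 1
--     elif 'hihat' in name:
--         return 2
--     elif 'tom' in name:
--         return 3
--     elif any(c in name for c in ['crash', 'ride', 'china', 'splash', 'cymbal']):
--         return 4
--     else:
--         return 5
-- ===== SOURCE B (Python) =====
-- # Single flat note->index table (GM_DRUM_MAP merged with the name-classification cascade); one lookup, default 5.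
-- _NOTE_CATEGORY = {
--     35: 0, 36: 0, 37: 1, 38: 1, 39: 1, 40: 1,
--     41: 3, 42: 2, 43: 3, 44: 2, 45: 3, 46: 2, 47: 3, 48: 3,
--     49: 4, 50: 3, 51: 4, 52: 4, 53: 4, 54: 5, 55: 4, 56: 5,
--     57: 4, 58: 5, 59: 4,
-- }
--
-- def note_to_category(note: int) -> int:
--     """Map MIDI note to instrument category index."""
--     return _NOTE_CATEGORY.get(note, 5)
-- ===== Notes on version B (the rewrite author's own statement) =====
-- stated objective: simpler
-- what changed: Replaces the name lookup plus if/elif substring cascade with one precomputed note->index table and a single dict .get with default 5.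
import Mathlib
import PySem

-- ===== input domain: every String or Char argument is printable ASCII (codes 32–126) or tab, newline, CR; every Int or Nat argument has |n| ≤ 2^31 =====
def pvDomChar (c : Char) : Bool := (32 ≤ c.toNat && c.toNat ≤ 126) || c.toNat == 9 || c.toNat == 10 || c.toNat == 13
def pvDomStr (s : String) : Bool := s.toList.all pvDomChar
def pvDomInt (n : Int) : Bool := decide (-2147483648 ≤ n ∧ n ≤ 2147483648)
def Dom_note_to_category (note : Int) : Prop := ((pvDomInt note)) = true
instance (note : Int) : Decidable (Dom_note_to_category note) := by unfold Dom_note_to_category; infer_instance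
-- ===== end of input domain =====

-- B replaces A's name lookup + substring cascade with one flat note->index table; objective: simpler.

-- ===== PORT A =====
def GM_DRUM_MAP : PySem.Dict Int String := PySem.Dict.ofList
  [(35, "kick"), (36, "kick"),
   (37, "sidestick"), (38, "snare"), (39, "clap"), (40, "snare"),
   (41, "tom_low"), (42, "hihat_closed"), (43, "tom_low"), (44, "hihat_pedal"),
   (45, "tom_mid"), (46, "hihat_open"), (47, "tom_mid"), (48, "tom_high"),
   (49, "crash"), (50, "tom_high"), (51, "ride"), (52, "china"),
   (53, "ride_bell"), (54, "tambourine"), (55, "splash"), (56, "cowbell"),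
   (57, "crash2"), (58, "vibraslap"), (59, "ride2")]

def note_to_category (note : Int) : Int :=
  let name := GM_DRUM_MAP.getD note "other"
  if PySem.Str.isIn "kick" name then 0
  else if PySem.Str.isIn "snare" name || PySem.Str.isIn "sidestick" name || PySem.Str.isIn "clap" name then 1
  else if PySem.Str.isIn "hihat" name then 2
  else if PySem.Str.isIn "tom" name then 3
  else if (["crash", "ride", "china", "splash", "cymbal"] : List String).any (fun c => PySem.Str.isIn c name) then 4
  else 5

-- ===== PORT B =====
def NOTE_CATEGORY : PySem.Dict Int Int := PySem.Dict.ofList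
  [(35, 0), (36, 0), (37, 1), (38, 1), (39, 1), (40, 1),
   (41, 3), (42, 2), (43, 3), (44, 2), (45, 3), (46, 2), (47, 3), (48, 3),
   (49, 4), (50, 3), (51, 4), (52, 4), (53, 4), (54, 5), (55, 4), (56, 5),
   (57, 4), (58, 5), (59, 4)]

def note_to_category_alt (note : Int) : Int :=
  NOTE_CATEGORY.getD note 5

-- ===== PRECONDITION & SPEC =====
def Spec_note_to_category (note : Int) (out : Int) : Prop := out = note_to_category_alt note
instance (note : Int) (out : Int) : Decidable (Spec_note_to_category note out) := by unfold Spec_note_to_category; infer_instance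

-- ===== CLAIM (what is proved, stated in full; the proofs are below) =====
def Claim_equal_note_to_category : Prop := ∀ (note : Int), Dom_note_to_category note → Spec_note_to_category note (note_to_category note)

-- ===== LEMMAS AND PROOFS =====
theorem GM_DRUM_MAP_items : GM_DRUM_MAP.items =
  [((35:Int), "kick"), (36, "kick"),
   (37, "sidestick"), (38, "snare"), (39, "clap"), (40, "snare"),
   (41, "tom_low"), (42, "hihat_closed"), (43, "tom_low"), (44, "hihat_pedal"),
   (45, "tom_mid"), (46, "hihat_open"), (47, "tom_mid"), (48, "tom_high"),
   (49, "crash"), (50, "tom_high"), (51, "ride"), (52, "china"),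
   (53, "ride_bell"), (54, "tambourine"), (55, "splash"), (56, "cowbell"),
   (57, "crash2"), (58, "vibraslap"), (59, "ride2")] := by decide

theorem NOTE_CATEGORY_items : NOTE_CATEGORY.items =
  [((35:Int), (0:Int)), (36, 0), (37, 1), (38, 1), (39, 1), (40, 1),
   (41, 3), (42, 2), (43, 3), (44, 2), (45, 3), (46, 2), (47, 3), (48, 3),
   (49, 4), (50, 3), (51, 4), (52, 4), (53, 4), (54, 5), (55, 4), (56, 5),
   (57, 4), (58, 5), (59, 4)] := by decide

theorem both_default (note : Int) (h : note < 35 ∨ 59 < note) :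
    note_to_category note = 5 ∧ note_to_category_alt note = 5 := by
  have h35 : (((35:Int)) == note) = false := by simp; omega
  have h36 : (((36:Int)) == note) = false := by simp; omega
  have h37 : (((37:Int)) == note) = false := by simp; omega
  have h38 : (((38:Int)) == note) = false := by simp; omega
  have h39 : (((39:Int)) == note) = false := by simp; omega
  have h40 : (((40:Int)) == note) = false := by simp; omega
  have h41 : (((41:Int)) == note) = false := by simp; omega
  have h42 : (((42:Int)) == note) = false := by simp; omega
  have h43 : (((43:Int)) == note) = false := by simp; omega
  have h44 : (((44:Int)) == note) = false := by simp; omega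
  have h45 : (((45:Int)) == note) = false := by simp; omega
  have h46 : (((46:Int)) == note) = false := by simp; omega
  have h47 : (((47:Int)) == note) = false := by simp; omega
  have h48 : (((48:Int)) == note) = false := by simp; omega
  have h49 : (((49:Int)) == note) = false := by simp; omega
  have h50 : (((50:Int)) == note) = false := by simp; omega
  have h51 : (((51:Int)) == note) = false := by simp; omega
  have h52 : (((52:Int)) == note) = false := by simp; omega
  have h53 : (((53:Int)) == note) = false := by simp; omega
  have h54 : (((54:Int)) == note) = false := by simp; omega
  have h55 : (((55:Int)) == note) = false := by simp; omega
  have h56 : (((56:Int)) == note) = false := by simp; omega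
  have h57 : (((57:Int)) == note) = false := by simp; omega
  have h58 : (((58:Int)) == note) = false := by simp; omega
  have h59 : (((59:Int)) == note) = false := by simp; omega
  constructor <;>
    simp only [note_to_category, note_to_category_alt, PySem.Dict.getD, PySem.Dict.get?,
      GM_DRUM_MAP_items, NOTE_CATEGORY_items, List.find?,
      h35, h36, h37, h38, h39, h40, h41, h42, h43, h44, h45, h46, h47, h48,
      h49, h50, h51, h52, h53, h54, h55, h56, h57, h58, h59, Option.map_none, Option.getD_none] <;> decide

-- ===== VERDICT (by name: the statement is the Claim_ definition above) =====
theorem note_to_category_spec : Claim_equal_note_to_category := by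
  intro note _
  unfold Spec_note_to_category
  by_cases h : 35 ≤ note ∧ note ≤ 59
  · obtain ⟨h1, h2⟩ := h
    interval_cases note <;> decide
  · have := both_default note (by omega)
    omega
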